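-- pv_equiv track=rewrite | github.com/estevanhernandez-stack-ed/PriceScout-AzureBuild | app/utils.py | _categorize_formats
-- ===== SOURCE A (Python) =====
-- def _categorize_formats(format_str: str, plf_formats: set) -> tuple[list[str], list[str]]:
--     """
--     Splits a format string into premium formats and general amenities.
--     Premium formats are defined as 3D, D-BOX, or anything in the PLF list.
--     """
--     if not format_str:
--         return [], []
--
--     all_formats = {part.strip() for part in format_str.split(',')}
--
--     # Define what constitutes a "premium" format for display purposes
--     premium_keywords = {'3d', 'd-box'}.union(plf_formats)
--
--     premium = sorted([f for f in all_formats if f.lower() in premium_keywords])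
--     general = sorted([f for f in all_formats if f.lower() not in premium_keywords and f.lower() != '2d'])
--     return premium, general
-- ===== SOURCE B (Python) =====
-- def _ins(lst, x):
--     """Insert x into sorted list lst in place, keeping it sorted and duplicate-free."""
--     for i, y in enumerate(lst):
--         if x == y:
--             return
--         if x < y:
--             lst.insert(i, x)
--             return
--     lst.append(x)
--
--
-- def _categorize_formats(format_str: str, plf_formats: set) -> tuple[list[str], list[str]]:
--     if not format_str:
--         return [], []
--     premium_keywords = {'3d', 'd-box'}.union(plf_formats)
--     premium, general = [], []
--     for part in format_str.split(','):
--         f = part.strip()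
--         low = f.lower()
--         if low in premium_keywords:
--             _ins(premium, f)
--         elif low != '2d':
--             _ins(general, f)
--     return premium, general
-- ===== Notes on version B (the rewrite author's own statement) =====
-- stated objective: alternative
-- what changed: A dedups all stripped parts into a set, filters it twice and library-sorts each filtered list; B never builds the set or calls sorted: it scans the raw parts once and maintains each output as a sorted duplicate-free list via ordered insertion, deduplicating and sorting incrementally per class.
import Mathlib
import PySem

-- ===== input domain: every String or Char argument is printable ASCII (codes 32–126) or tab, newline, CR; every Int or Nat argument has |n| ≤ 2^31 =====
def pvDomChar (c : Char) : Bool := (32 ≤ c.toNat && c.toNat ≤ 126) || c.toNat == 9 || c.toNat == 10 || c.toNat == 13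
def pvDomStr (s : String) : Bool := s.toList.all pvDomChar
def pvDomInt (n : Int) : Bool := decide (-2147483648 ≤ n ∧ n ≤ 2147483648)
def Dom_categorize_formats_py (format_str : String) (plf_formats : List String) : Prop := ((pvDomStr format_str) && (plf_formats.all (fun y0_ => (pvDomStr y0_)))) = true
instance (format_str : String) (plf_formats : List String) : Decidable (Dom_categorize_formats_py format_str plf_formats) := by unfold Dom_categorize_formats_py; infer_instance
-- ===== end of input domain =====

-- B drops A's set-then-filter-then-sort pipeline: it scans the raw split parts once and
-- keeps each output list sorted and duplicate-free by ordered insertion (objective: alternative).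

-- ===== PORT A =====
-- predicate "f.lower() in premium_keywords"
def pvIsPremium (kw : PySem.Set String) (f : String) : Bool :=
  PySem.Set.contains kw (PySem.Str.lower f)

def categorize_formats_py (format_str : String) (plf_formats : List String) : List String × List String :=
  if format_str = "" then ([], [])
  else
    let all_formats : PySem.Set String :=
      PySem.Set.ofList (((PySem.Str.split? format_str ",").getD []).map PySem.Str.strip)
    let premium_keywords : PySem.Set String :=
      PySem.Set.union (PySem.Set.ofList ["3d", "d-box"]) plf_formats
    let premium := PySem.List.sorted
      (all_formats.filter (fun f => pvIsPremium premium_keywords f)) (fun x => x) false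
    let general := PySem.List.sorted
      (all_formats.filter (fun f =>
        !pvIsPremium premium_keywords f && !(PySem.Str.lower f == "2d"))) (fun x => x) false
    (premium, general)

-- ===== PORT B =====
-- _ins: insert x into the sorted duplicate-free list, skipping it if already present
def pvIns (x : String) : List String → List String
  | [] => [x]
  | y :: t => if x = y then y :: t else if x < y then x :: y :: t else y :: pvIns x t

def categorize_formats_py_alt (format_str : String) (plf_formats : List String) : List String × List String :=
  if format_str = "" then ([], [])
  else
    let premium_keywords : PySem.Set String :=
      PySem.Set.union (PySem.Set.ofList ["3d", "d-box"]) plf_formats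
    ((PySem.Str.split? format_str ",").getD []).foldl (fun acc part =>
      let f := PySem.Str.strip part
      if pvIsPremium premium_keywords f then (pvIns f acc.1, acc.2)
      else if PySem.Str.lower f == "2d" then acc
      else (acc.1, pvIns f acc.2)) ([], [])

-- ===== PRECONDITION & SPEC =====
def Spec_categorize_formats_py (format_str : String) (plf_formats : List String) (out : List String × List String) : Prop := out = categorize_formats_py_alt format_str plf_formats
instance (format_str : String) (plf_formats : List String) (out : List String × List String) : Decidable (Spec_categorize_formats_py format_str plf_formats out) := by unfold Spec_categorize_formats_py; infer_instance

-- ===== CLAIM (what is proved, stated in full; the proofs are below) =====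
def Claim_equal_categorize_formats_py : Prop := ∀ (format_str : String) (plf_formats : List String), Dom_categorize_formats_py format_str plf_formats → Spec_categorize_formats_py format_str plf_formats (categorize_formats_py format_str plf_formats)

-- ===== LEMMAS AND PROOFS =====

theorem mem_pvIns (a x : String) (l : List String) : a ∈ pvIns x l ↔ a = x ∨ a ∈ l := by
  induction l with
  | nil => simp [pvIns]
  | cons y t ih =>
    simp only [pvIns]
    split_ifs with h1 h2
    · subst h1; simp [List.mem_cons]
    · simp [List.mem_cons]
    · simp [List.mem_cons, ih]; tauto

theorem pairwise_pvIns (x : String) (l : List String) (h : l.Pairwise (· < ·)) :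
    (pvIns x l).Pairwise (· < ·) := by
  induction l with
  | nil => simp [pvIns]
  | cons y t ih =>
    simp only [pvIns]
    rcases List.pairwise_cons.1 h with ⟨hy, ht⟩
    split_ifs with h1 h2
    · exact h
    · refine List.pairwise_cons.2 ⟨?_, h⟩
      intro b hb
      rcases List.mem_cons.1 hb with rfl | hb
      · exact h2
      · exact lt_trans h2 (hy b hb)
    · refine List.pairwise_cons.2 ⟨?_, ih ht⟩
      intro b hb
      rcases (mem_pvIns b x t).1 hb with rfl | hb
      · exact lt_of_le_of_ne (not_lt.1 h2) (Ne.symm h1)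
      · exact hy b hb

-- B's classifying fold = ordered-insert folds of the two filtered sublists
theorem pv_fold_split (kw : PySem.Set String) (L : List String) (p g : List String) :
    L.foldl (fun acc part =>
      let f := PySem.Str.strip part
      if pvIsPremium kw f then (pvIns f acc.1, acc.2)
      else if PySem.Str.lower f == "2d" then acc
      else (acc.1, pvIns f acc.2)) (p, g)
    = (((L.map PySem.Str.strip).filter (fun f => pvIsPremium kw f)).foldl (fun acc f => pvIns f acc) p,
       ((L.map PySem.Str.strip).filter (fun f => !pvIsPremium kw f && !(PySem.Str.lower f == "2d"))).foldl (fun acc f => pvIns f acc) g) := by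
  induction L generalizing p g with
  | nil => simp
  | cons x t ih =>
    simp only [List.foldl_cons, List.map_cons, List.filter_cons]
    by_cases h1 : pvIsPremium kw (PySem.Str.strip x)
    · simpa [h1] using ih (pvIns (PySem.Str.strip x) p) g
    · by_cases h2 : (PySem.Str.lower (PySem.Str.strip x) == "2d") = true
      · simpa [h1, h2] using ih p g
      · simpa [h1, h2] using ih p (pvIns (PySem.Str.strip x) g)

theorem mem_foldIns (a : String) (M s : List String) :
    a ∈ M.foldl (fun acc f => pvIns f acc) s ↔ a ∈ M ∨ a ∈ s := by
  induction M generalizing s with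
  | nil => simp
  | cons x t ih => simp [ih, mem_pvIns]; tauto

theorem pairwise_foldIns (M s : List String) (h : s.Pairwise (· < ·)) :
    (M.foldl (fun acc f => pvIns f acc) s).Pairwise (· < ·) := by
  induction M generalizing s with
  | nil => exact h
  | cons x t ih => exact ih _ (pairwise_pvIns x s h)

-- the ordered-insert fold of a filtered token list IS A's sorted filtered set
theorem pv_sorted_eq_foldIns (T : List String) (P : String → Bool) :
    PySem.List.sorted ((PySem.Set.ofList T).filter P) (fun x => x) false
    = (T.filter P).foldl (fun acc f => pvIns f acc) [] := by
  apply PySem.List.sorted_eq_of_perm_of_pairwise_lt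
  · rw [List.perm_ext_iff_of_nodup]
    · intro a
      simp [mem_foldIns, List.mem_filter, PySem.Set.mem_ofList]

    · exact (pairwise_foldIns _ [] (by simp)).nodup
    · exact (PySem.Set.nodup_ofList T).filter P
  · exact pairwise_foldIns _ [] (by simp)

-- ===== VERDICT (by name: the statement is the Claim_ definition above) =====
theorem categorize_formats_py_spec : Claim_equal_categorize_formats_py := by
  intro format_str plf_formats _
  unfold Spec_categorize_formats_py categorize_formats_py categorize_formats_py_alt
  by_cases h : format_str = ""
  · simp [h]
  · simp only [h, if_false]
    rw [pv_fold_split, pv_sorted_eq_foldIns, pv_sorted_eq_foldIns]
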